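-- pv_equiv track=rewrite | github.com/nucccc/cy_to_py | cy_to_py/cy_to_py.py | has_func_call_args
-- ===== SOURCE A (Python) =====
-- def has_func_call_args(codeline : str) -> bool:
--     '''
--     has_func_call_args returns me if there is a set of arguments,
--     which is a valid condition for a function
--     '''
--     open_par_pos = -1
--     close_par_pos = -1
--     for pos, c in enumerate(codeline):
--         if c == '(':
--             if open_par_pos == -1:
--                 open_par_pos = pos
--             else:
--                 #in such case this would be the second open parenthesis, and i
--                 #thus return false
--                 return False
--         if c == ')':
--             if open_par_pos == -1:
--                 #in case i still didn't find an opening parenthesis then i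
--                 #should return false, since such close parenthesis doesn't
--                 #make sense
--                 return False
--             elif close_par_pos == -1:
--                 close_par_pos = pos
--             else:
--                 return False
--     if open_par_pos == -1 or close_par_pos == -1:
--         return False
--     return True
-- ===== SOURCE B (Python) =====
-- def has_func_call_args(codeline : str) -> bool:
--     '''
--     has_func_call_args returns me if there is a set of arguments,
--     which is a valid condition for a function
--     '''
--     opens = [pos for pos, c in enumerate(codeline) if c == '(']
--     closes = [pos for pos, c in enumerate(codeline) if c == ')']
--     return len(opens) == 1 and len(closes) == 1 and opens[0] < closes[0]
-- ===== Notes on version B (the rewrite author's own statement) =====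
-- stated objective: simpler
-- what changed: Replaced the stateful early-return scan (two sentinel position variables mutated in a loop) with a declarative closed form: collect the positions of open and close parentheses by comprehension and check there is exactly one of each with the open before the close.
import Mathlib
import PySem

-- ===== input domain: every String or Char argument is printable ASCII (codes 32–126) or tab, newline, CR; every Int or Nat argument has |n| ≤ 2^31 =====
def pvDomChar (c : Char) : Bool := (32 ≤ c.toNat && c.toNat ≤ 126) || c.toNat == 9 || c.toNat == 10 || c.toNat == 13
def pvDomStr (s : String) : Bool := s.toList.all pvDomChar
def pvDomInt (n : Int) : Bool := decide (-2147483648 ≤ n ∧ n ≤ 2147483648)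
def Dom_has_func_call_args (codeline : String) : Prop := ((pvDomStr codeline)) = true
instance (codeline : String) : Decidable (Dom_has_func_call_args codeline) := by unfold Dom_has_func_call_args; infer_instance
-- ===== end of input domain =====

-- B replaces A's stateful early-return scan by a declarative closed form over the
-- lists of '(' / ')' positions (simpler; same O(n) cost).


-- ===== PORT A =====
-- the 'for pos, c in enumerate(codeline)' loop with mutable open_par_pos / close_par_pos
def hfcaLoop : List Char → Int → Int → Int → Bool
  | [], op, cp, _ => if op = -1 ∨ cp = -1 then false else true
  | c :: rest, op, cp, pos =>
    if c = '(' then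
      if op = -1 then hfcaLoop rest pos cp (pos + 1) else false
    else if c = ')' then
      if op = -1 then false
      else if cp = -1 then hfcaLoop rest op pos (pos + 1)
      else false
    else hfcaLoop rest op cp (pos + 1)

def has_func_call_args (codeline : String) : Bool :=
  hfcaLoop codeline.toList (-1) (-1) 0

-- ===== PORT B =====
def has_func_call_args_alt (codeline : String) : Bool :=
  let opens := ((PySem.List.enumerate codeline.toList).filter (fun p => p.2 == '(')).map Prod.fst
  let closes := ((PySem.List.enumerate codeline.toList).filter (fun p => p.2 == ')')).map Prod.fst
  opens.length == 1 && closes.length == 1 &&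
    decide (PySem.List.pyGetD opens 0 0 < PySem.List.pyGetD closes 0 0)

-- ===== PRECONDITION & SPEC =====
def Spec_has_func_call_args (codeline : String) (out : Bool) : Prop := out = has_func_call_args_alt codeline
instance (codeline : String) (out : Bool) : Decidable (Spec_has_func_call_args codeline out) := by unfold Spec_has_func_call_args; infer_instance

-- ===== CLAIM (what is proved, stated in full; the proofs are below) =====
def Claim_equal_has_func_call_args : Prop := ∀ (codeline : String), Dom_has_func_call_args codeline → Spec_has_func_call_args codeline (has_func_call_args codeline)

-- ===== LEMMAS AND PROOFS =====

-- both programs, re-expressed on the character list: the common characterisation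
def hfcaChar (cs : List Char) : Bool :=
  cs.count '(' == 1 && cs.count ')' == 1 &&
    decide ((cs.idxOf '(' : Int) < (cs.idxOf ')' : Int))

-- 'enumerate' unfolds one step (definitional)
theorem enumerate_cons (x : Char) (xs : List Char) (n : Int) :
    PySem.List.enumerate (x :: xs) n = (n, x) :: PySem.List.enumerate xs (n + 1) := rfl

-- length of the position list = count of the character
theorem enumFilterLen (c : Char) (cs : List Char) (n : Int) :
    (((PySem.List.enumerate cs n).filter (fun p => p.2 == c)).map Prod.fst).length
      = cs.count c := by
  induction cs generalizing n with
  | nil => simp [PySem.List.enumerate]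
  | cons x xs ih =>
    rw [enumerate_cons]
    by_cases h : x = c <;> simp [h, ih]

-- first listed position = first index of the character (shifted by the enumerate start)
theorem enumFilterHead (c : Char) (cs : List Char) (n : Int) (h : c ∈ cs) :
    ((((PySem.List.enumerate cs n).filter (fun p => p.2 == c)).map Prod.fst).getD 0 0)
      = n + cs.idxOf c := by
  induction cs generalizing n with
  | nil => simp at h
  | cons x xs ih =>
    rw [enumerate_cons]
    by_cases hx : x = c
    · simp [hx]
    · have hmem : c ∈ xs := by
        rcases List.mem_cons.mp h with h1 | h1
        · exact absurd h1.symm hx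
        · exact h1
      rw [List.filter_cons_of_neg (by simp [hx]), ih (n + 1) hmem,
        List.idxOf_cons]
      have e : (x == c) = false := beq_eq_false_iff_ne.mpr hx
      rw [e, cond_false]
      push_cast
      ring

-- B equals the common characterisation
theorem alt_eq_char (s : String) : has_func_call_args_alt s = hfcaChar s.toList := by
  unfold has_func_call_args_alt hfcaChar
  simp only [PySem.List.pyGetD_zero, enumFilterLen]
  by_cases h1 : s.toList.count '(' = 1 <;> by_cases h2 : s.toList.count ')' = 1
  · have m1 : '(' ∈ s.toList := List.count_pos_iff.mp (by omega)
    have m2 : ')' ∈ s.toList := List.count_pos_iff.mp (by omega)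
    rw [enumFilterHead '(' s.toList 0 m1, enumFilterHead ')' s.toList 0 m2]
    simp [h1, h2]
  · rw [beq_eq_false_iff_ne.mpr h2]
    simp
  · rw [beq_eq_false_iff_ne.mpr h1]
    simp
  · rw [beq_eq_false_iff_ne.mpr h1]
    simp

-- loop, state after both parentheses were found: succeeds iff no further parenthesis
theorem loop2 (cs : List Char) (op cp pos : Int) (hop : op ≠ -1) (hcp : cp ≠ -1) :
    hfcaLoop cs op cp pos = (cs.count '(' == 0 && cs.count ')' == 0) := by
  induction cs generalizing pos with
  | nil => simp [hfcaLoop, hop, hcp]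
  | cons x xs ih =>
    rw [hfcaLoop]
    by_cases h1 : x = '(' <;> by_cases h2 : x = ')' <;>
      simp_all

-- loop, state after the open parenthesis only: succeeds iff exactly one ')' and no '(' remain
theorem loop1 (cs : List Char) (op pos : Int) (hop : op ≠ -1) (hpos : 0 ≤ pos) :
    hfcaLoop cs op (-1) pos = (cs.count '(' == 0 && cs.count ')' == 1) := by
  induction cs generalizing pos with
  | nil => simp [hfcaLoop, hop]
  | cons x xs ih =>
    rw [hfcaLoop]
    by_cases h1 : x = '('
    · simp [h1, hop]
    · by_cases h2 : x = ')'
      · have hp : pos ≠ -1 := by omega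
        simp [h2, hop, loop2 xs op pos (pos + 1) hop hp]
      · simp [h1, h2, ih (pos + 1) (by omega)]

-- loop, initial state: succeeds iff the closed form holds
theorem loop0 (cs : List Char) (pos : Int) (hpos : 0 ≤ pos) :
    hfcaLoop cs (-1) (-1) pos = hfcaChar cs := by
  induction cs generalizing pos with
  | nil => simp [hfcaLoop, hfcaChar]
  | cons x xs ih =>
    rw [hfcaLoop]
    unfold hfcaChar
    by_cases h1 : x = '('
    · have hp : pos ≠ -1 := by omega
      simp [h1, loop1 xs pos (pos + 1) hp (by omega)]
    · by_cases h2 : x = ')'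
      · simp [h2]
        intro _ _
        positivity
      · simp [h1, h2, ih (pos + 1) (by omega), hfcaChar]

-- ===== VERDICT (by name: the statement is the Claim_ definition above) =====
theorem has_func_call_args_spec : Claim_equal_has_func_call_args := by
  intro s _
  unfold Spec_has_func_call_args has_func_call_args
  rw [loop0 s.toList 0 (by omega), alt_eq_char]
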